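-- pv_equiv track=rewrite | github.com/ussoewwin/stable-diffusion-webui-forge-nunchaku | modules_forge/packages/huggingface_guess/detection.py | unet_prefix_from_state_dict
-- ===== SOURCE A (Python) =====
-- def unet_prefix_from_state_dict(state_dict):
--     candidates = [
--         "model.diffusion_model.",  # ldm/sgm models
--         "model.model.",  # audio models
--         "net.",  # cosmos
--     ]
--     counts = {k: 0 for k in candidates}
--     for k in state_dict:
--         for c in candidates:
--             if k.startswith(c):
--                 counts[c] += 1
--                 break
--
--     top = max(counts, key=counts.get)
--     if counts[top] > 5:
--         return top
--     else:
--         return "model."  # etc.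
-- ===== SOURCE B (Python) =====
-- def unet_prefix_from_state_dict(state_dict):
--     def count(prefix):
--         return sum(1 for k in state_dict if k.startswith(prefix))
--
--     n1 = count("model.diffusion_model.")  # ldm/sgm models
--     n2 = count("model.model.")  # audio models
--     n3 = count("net.")  # cosmos
--     if n1 > 5 and n1 >= n2 and n1 >= n3:
--         return "model.diffusion_model."
--     if n2 > 5 and n2 >= n3:
--         return "model.model."
--     if n3 > 5:
--         return "net."
--     return "model."  # etc.
-- ===== Notes on version B (the rewrite author's own statement) =====
-- stated objective: simpler
-- what changed: Replaces the dict tally with a break-on-first-match inner loop plus max(counts, key=counts.get) by three independent prefix counts and an explicit early-return comparison chain encoding the same max/threshold rule (prefixes are mutually non-overlapping, so the break never affects the tallies).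
import Mathlib
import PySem

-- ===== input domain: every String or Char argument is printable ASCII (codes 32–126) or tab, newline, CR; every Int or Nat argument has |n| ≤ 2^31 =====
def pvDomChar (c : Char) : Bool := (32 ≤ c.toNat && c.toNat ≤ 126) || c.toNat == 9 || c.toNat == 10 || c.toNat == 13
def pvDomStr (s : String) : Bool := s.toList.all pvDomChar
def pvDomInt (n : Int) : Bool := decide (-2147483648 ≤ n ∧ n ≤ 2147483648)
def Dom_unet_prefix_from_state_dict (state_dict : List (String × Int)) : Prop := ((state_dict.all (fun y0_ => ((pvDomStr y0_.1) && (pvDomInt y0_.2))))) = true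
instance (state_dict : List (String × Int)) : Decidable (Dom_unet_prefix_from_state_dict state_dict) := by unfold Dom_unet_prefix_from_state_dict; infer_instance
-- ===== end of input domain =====

-- B replaces A's dict tally (inner candidate loop with break + max(counts, key=counts.get))
-- by three independent prefix counts and an explicit comparison chain; objective: simpler.

-- ===== PORT A =====
def upCandidates : List String := ["model.diffusion_model.", "model.model.", "net."]

-- inner 'for c in candidates: if k.startswith(c): counts[c] += 1; break'
def upInner (counts : PySem.Dict String Int) (k : String) : List String → PySem.Dict String Int
  | [] => counts
  | c :: rest =>
    if PySem.Str.startswith k c then counts.modify c 0 (· + 1)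
    else upInner counts k rest

-- 'for k in state_dict' iterates the dict's keys: distinct keys in insertion order
def unet_prefix_from_state_dict (state_dict : List (String × Int)) : String :=
  let counts0 := upCandidates.foldl (fun d c => d.insert c (0 : Int)) PySem.Dict.empty
  let counts := (PySem.List.dedup (state_dict.map (·.1))).foldl
    (fun d k => upInner d k upCandidates) counts0
  -- top = max(counts, key=counts.get); every queried key is present, so get = getD _ 0;
  -- counts always has the three candidate keys, so the none branch is unreachable
  match PySem.List.max? counts.keys (fun c => counts.getD c 0) with
  | some top => if counts.getD top 0 > 5 then top else "model."
  | none => "model."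

-- ===== PORT B =====
-- count(p) = sum(1 for k in state_dict if k.startswith(p)); dict iteration = distinct keys
def upCount (state_dict : List (String × Int)) (p : String) : Int :=
  ((PySem.List.dedup (state_dict.map (·.1))).countP
    (fun k => PySem.Str.startswith k p) : Nat)

def unet_prefix_from_state_dict_alt (state_dict : List (String × Int)) : String :=
  let n1 := upCount state_dict "model.diffusion_model."
  let n2 := upCount state_dict "model.model."
  let n3 := upCount state_dict "net."
  if n1 > 5 ∧ n1 ≥ n2 ∧ n1 ≥ n3 then "model.diffusion_model."
  else if n2 > 5 ∧ n2 ≥ n3 then "model.model."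
  else if n3 > 5 then "net."
  else "model."

-- ===== PRECONDITION & SPEC =====
def Spec_unet_prefix_from_state_dict (state_dict : List (String × Int)) (out : String) : Prop := out = unet_prefix_from_state_dict_alt state_dict
instance (state_dict : List (String × Int)) (out : String) : Decidable (Spec_unet_prefix_from_state_dict state_dict out) := by unfold Spec_unet_prefix_from_state_dict; infer_instance

-- ===== CLAIM (what is proved, stated in full; the proofs are below) =====
def Claim_equal_unet_prefix_from_state_dict : Prop := ∀ (state_dict : List (String × Int)), Dom_unet_prefix_from_state_dict state_dict → Spec_unet_prefix_from_state_dict state_dict (unet_prefix_from_state_dict state_dict)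

-- ===== LEMMAS AND PROOFS =====

-- the three candidate prefixes are mutually non-overlapping: no key starts with two of them
lemma up_disjoint (k c c' : String) (hc : c ∈ upCandidates) (hc' : c' ∈ upCandidates)
    (hne : c ≠ c') (h : PySem.Str.startswith k c = true) :
    PySem.Str.startswith k c' = false := by
  by_contra hsw
  rw [Bool.not_eq_false, PySem.Str.startswith_eq, PySem.Chars.startswith_iff] at hsw
  rw [PySem.Str.startswith_eq, PySem.Chars.startswith_iff] at h
  have hor := List.prefix_or_prefix_of_prefix h hsw
  fin_cases hc <;> fin_cases hc' <;> simp_all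

-- keys are preserved by one inner step (it only modifies keys already present)
lemma up_keys_inner (d : PySem.Dict String Int) (k : String) (cs : List String)
    (h : ∀ c ∈ cs, d.contains c = true) :
    (upInner d k cs).keys = d.keys := by
  induction cs with
  | nil => rfl
  | cons c rest ih =>
    simp only [upInner]
    split
    · rw [PySem.Dict.keys_modify, PySem.Dict.keys_insert_of_contains]
      exact h c (by simp)
    · exact ih (fun c' hc' => h c' (by simp [hc']))

lemma up_contains_inner (d : PySem.Dict String Int) (k c : String) (cs : List String)
    (h : ∀ c' ∈ cs, d.contains c' = true) (hc : d.contains c = true) :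
    (upInner d k cs).contains c = true := by
  rw [PySem.Dict.contains_iff_mem_keys, up_keys_inner d k cs h,
      ← PySem.Dict.contains_iff_mem_keys]
  exact hc

-- one inner step, read at a candidate c: adds 1 exactly when k starts with c
lemma up_getD_inner (d : PySem.Dict String Int) (k c : String) (hc : c ∈ upCandidates) :
    (upInner d k upCandidates).getD c 0 =
      d.getD c 0 + (if PySem.Str.startswith k c then 1 else 0) := by
  have step : ∀ cs : List String, cs.Sublist upCandidates → cs.Nodup →
      (c ∈ cs → (upInner d k cs).getD c 0 =
        d.getD c 0 + (if PySem.Str.startswith k c then 1 else 0)) ∧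
      (c ∉ cs → (upInner d k cs).getD c 0 = d.getD c 0) := by
    intro cs hsub hnd
    induction cs with
    | nil => exact ⟨by simp, fun _ => rfl⟩
    | cons c' rest ih =>
      have hsub' : rest.Sublist upCandidates := (List.sublist_cons_self c' rest).trans hsub
      have hnd' : rest.Nodup := hnd.of_cons
      have hc'mem : c' ∈ upCandidates := hsub.mem (by simp)
      obtain ⟨ih1, ih2⟩ := ih hsub' hnd'
      refine ⟨fun hmem => ?_, fun hnmem => ?_⟩
      · rcases List.mem_cons.mp hmem with heq | hmem'
        · subst heq
          simp only [upInner]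
          split
          · rw [PySem.Dict.getD_modify]; simp
          · rw [ih2 (List.nodup_cons.mp hnd).1]; simp
        · have hne : c ≠ c' := fun h => (List.nodup_cons.mp hnd).1 (h ▸ hmem')
          simp only [upInner]
          split
          · next hsw =>
            rw [PySem.Dict.getD_modify, if_neg hne,
                up_disjoint k c' c hc'mem hc (Ne.symm hne) hsw]
            simp
          · exact ih1 hmem'
      · have hne : c ≠ c' := fun h => hnmem (h ▸ List.mem_cons_self ..)
        simp only [upInner]
        split
        · rw [PySem.Dict.getD_modify, if_neg hne]
        · exact ih2 (fun h => hnmem (List.mem_cons_of_mem _ h))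
  exact (step upCandidates (List.Sublist.refl _) (by decide)).1 hc

-- the whole key loop, read at a candidate c: counts the keys starting with c
lemma up_getD_fold (L : List String) (d : PySem.Dict String Int) (c : String)
    (hc : c ∈ upCandidates) (hcont : ∀ c' ∈ upCandidates, d.contains c' = true) :
    (L.foldl (fun d k => upInner d k upCandidates) d).getD c 0 =
      d.getD c 0 + (L.countP (fun k => PySem.Str.startswith k c) : Nat) := by
  induction L generalizing d with
  | nil => simp
  | cons k rest ih =>
    have hcont' : ∀ c' ∈ upCandidates, (upInner d k upCandidates).contains c' = true :=
      fun c' h => up_contains_inner d k c' upCandidates hcont (hcont c' h)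
    rw [List.foldl_cons, ih _ hcont', up_getD_inner d k c hc, List.countP_cons]
    by_cases h : PySem.Str.startswith k c = true <;> simp [h] <;> push_cast <;> ring_nf

-- keys are preserved by the whole key loop
lemma up_keys_fold (L : List String) (d : PySem.Dict String Int)
    (hcont : ∀ c' ∈ upCandidates, d.contains c' = true) :
    (L.foldl (fun d k => upInner d k upCandidates) d).keys = d.keys := by
  induction L generalizing d with
  | nil => rfl
  | cons k rest ih =>
    rw [List.foldl_cons,
        ih _ (fun c' h => up_contains_inner d k c' upCandidates hcont (hcont c' h)),
        up_keys_inner d k upCandidates hcont]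

-- A's max-then-threshold over the three fixed keys equals B's comparison chain
lemma up_select (g : String → Int) :
    (match PySem.List.max? ["model.diffusion_model.", "model.model.", "net."] g with
     | some top => if g top > 5 then top else "model."
     | none => "model.") =
    (if g "model.diffusion_model." > 5 ∧ g "model.diffusion_model." ≥ g "model.model." ∧
        g "model.diffusion_model." ≥ g "net." then "model.diffusion_model."
     else if g "model.model." > 5 ∧ g "model.model." ≥ g "net." then "model.model."
     else if g "net." > 5 then "net."
     else "model.") := by
  simp only [PySem.List.max?, List.foldl_cons, List.foldl_nil]
  split_ifs <;> simp_all <;> split_ifs <;> simp_all <;> split_ifs <;> first | rfl | omega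

theorem unet_prefix_from_state_dict_spec_aux (state_dict : List (String × Int)) :
    unet_prefix_from_state_dict state_dict = unet_prefix_from_state_dict_alt state_dict := by
  simp only [unet_prefix_from_state_dict, unet_prefix_from_state_dict_alt, upCount]
  set L := PySem.List.dedup (state_dict.map (·.1)) with hL
  set d0 : PySem.Dict String Int :=
    upCandidates.foldl (fun d c => d.insert c (0 : Int)) PySem.Dict.empty with hd0
  have hcont : ∀ c' ∈ upCandidates, d0.contains c' = true := by decide
  have hkeys : (L.foldl (fun d k => upInner d k upCandidates) d0).keys =
      ["model.diffusion_model.", "model.model.", "net."] := by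
    rw [up_keys_fold L d0 hcont]; decide
  rw [hkeys, up_select]
  have h1 := up_getD_fold L d0 "model.diffusion_model." (by decide) hcont
  have h2 := up_getD_fold L d0 "model.model." (by decide) hcont
  have h3 := up_getD_fold L d0 "net." (by decide) hcont
  have hd01 : d0.getD "model.diffusion_model." 0 = 0 := by decide
  have hd02 : d0.getD "model.model." 0 = 0 := by decide
  have hd03 : d0.getD "net." 0 = 0 := by decide
  rw [hd01, zero_add] at h1; rw [hd02, zero_add] at h2; rw [hd03, zero_add] at h3
  rw [h1, h2, h3]
  rfl

-- ===== VERDICT (by name: the statement is the Claim_ definition above) =====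
theorem unet_prefix_from_state_dict_spec : Claim_equal_unet_prefix_from_state_dict := by
  intro sd _
  exact unet_prefix_from_state_dict_spec_aux sd
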